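-- pv_equiv track=rewrite | github.com/gsnedders/py-regexp-builder | builder.py | _inferRanges
-- ===== SOURCE A (Python) =====
-- def _inferRanges(sequence):
--     """Infer ranges from a sequence of boolean values.
--
--     The sequence is taken to represent U+n with its nth codepoint,
--     True where allowed and False where not.
--
--     >>> _inferRanges([])
--     []
--     >>> _inferRanges([False])
--     []
--     >>> _inferRanges([True])
--     [(0, 0)]
--     >>> _inferRanges([True, True, True])
--     [(0, 2)]
--     >>> _inferRanges([True, True, False])
--     [(0, 1)]
--     >>> _inferRanges([False, True, True])
--     [(1, 2)]
--     >>> _inferRanges([False, True, False])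
--     [(1, 1)]
--     """
--     ranges = []
--     start = None
--
--     for i, allow in enumerate(sequence):
--         if start is not None and not allow:
--             ranges.append((start, i - 1))
--             start = None
--         elif start is None and allow:
--             start = i
--
--     if start is not None:
--         ranges.append((start, i))
--
--     return ranges
-- ===== SOURCE B (Python) =====
-- def _inferRanges(sequence):
--     """Two-pointer run scanner: find each maximal run of equal truthiness,
--     emit (start, end) for the truthy runs."""
--     ranges = []
--     i, n = 0, len(sequence)
--     while i < n:
--         j = i + 1
--         while j < n and bool(sequence[j]) == bool(sequence[i]):
--             j += 1
--         if sequence[i]: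
--             ranges.append((i, j - 1))
--         i = j
--     return ranges
-- ===== Notes on version B (the rewrite author's own statement) =====
-- stated objective: alternative
-- what changed: Replaced A's per-element state machine (Optional start sentinel plus post-loop flush) with a two-pointer scan over maximal runs of equal truthiness, emitting (i, j-1) for each truthy run.
import Mathlib
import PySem

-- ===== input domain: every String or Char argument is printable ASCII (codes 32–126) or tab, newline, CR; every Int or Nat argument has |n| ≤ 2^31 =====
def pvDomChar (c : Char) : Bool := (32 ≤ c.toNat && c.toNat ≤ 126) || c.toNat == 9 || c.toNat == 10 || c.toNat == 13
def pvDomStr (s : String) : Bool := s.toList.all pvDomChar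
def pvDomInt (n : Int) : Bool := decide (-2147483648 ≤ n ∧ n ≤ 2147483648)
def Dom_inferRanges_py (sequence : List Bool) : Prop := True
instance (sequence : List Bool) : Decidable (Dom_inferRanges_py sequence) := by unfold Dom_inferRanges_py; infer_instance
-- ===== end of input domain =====

-- B replaces A's sentinel-variable state machine with a two-pointer run scanner (alternative decomposition, same cost); both are total and return-value only.

-- ===== PORT A =====
-- loop body of A: state = (ranges, start); element = (i, allow)
def inferRangesStepA (st : List (Int × Int) × Option Int) (p : Int × Bool) :
    List (Int × Int) × Option Int :=
  match st.2, p.2 with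
  | some start, false => (st.1 ++ [(start, p.1 - 1)], none)  -- if start is not None and not allow
  | none, true => (st.1, some p.1)                           -- elif start is None and allow
  | _, _ => st

def inferRanges_py (sequence : List Bool) : List (Int × Int) :=
  let r := (PySem.List.enumerate sequence 0).foldl inferRangesStepA ([], none)
  match r.2 with
  -- final i equals len(sequence) - 1 (the loop necessarily ran if start is set)
  | some start => r.1 ++ [(start, (sequence.length : Int) - 1)]
  | none => r.1

-- ===== PORT B =====
-- outer while loop of B: at list position with absolute index i, the inner
-- while advances j past the run of elements equal to the head (k = run length - 1)
def inferRangesGo : List Bool → Int → List (Int × Int)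
  | [], _ => []
  | b :: xs, i =>
    let k := (xs.takeWhile (fun c => c == b)).length
    (if b then [(i, i + (k : Int))] else []) ++ inferRangesGo (xs.drop k) (i + k + 1)
termination_by l _ => l.length
decreasing_by simp [List.length_drop]

def inferRanges_py_alt (sequence : List Bool) : List (Int × Int) :=
  inferRangesGo sequence 0

-- ===== PRECONDITION & SPEC =====
def Spec_inferRanges_py (sequence : List Bool) (out : List (Int × Int)) : Prop := out = inferRanges_py_alt sequence
instance (sequence : List Bool) (out : List (Int × Int)) : Decidable (Spec_inferRanges_py sequence out) := by unfold Spec_inferRanges_py; infer_instance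

-- ===== CLAIM (what is proved, stated in full; the proofs are below) =====
def Claim_equal_inferRanges_py : Prop := ∀ (sequence : List Bool), Dom_inferRanges_py sequence → Spec_inferRanges_py sequence (inferRanges_py sequence)

-- ===== LEMMAS AND PROOFS =====

-- A's post-loop flush, with e the final index value
def inferRangesFin (p : List (Int × Int) × Option Int) (e : Int) : List (Int × Int) :=
  match p.2 with
  | some s => p.1 ++ [(s, e)]
  | none => p.1

-- B's scanner in the middle of an open truthy run that started at absolute index s
def inferRangesOpen (s i : Int) (xs : List Bool) : List (Int × Int) :=
  let k := (xs.takeWhile (fun c => c == true)).length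
  (s, i + (k : Int) - 1) :: inferRangesGo (xs.drop k) (i + k)

lemma go_false (xs : List Bool) (i : Int) :
    inferRangesGo (false :: xs) i = inferRangesGo xs (i + 1) := by
  cases xs with
  | nil => simp [inferRangesGo]
  | cons x ys =>
    cases x with
    | true => simp [inferRangesGo]
    | false =>
      rw [inferRangesGo, inferRangesGo]
      simp only [List.takeWhile, Bool.false_eq_true, if_false]
      simp [List.length_cons]
      ring_nf

lemma go_true (xs : List Bool) (i : Int) :
    inferRangesGo (true :: xs) i = inferRangesOpen i (i + 1) xs := by
  rw [inferRangesGo, inferRangesOpen]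
  simp
  constructor
  · ring_nf
  · ring_nf

lemma open_true (s i : Int) (xs : List Bool) :
    inferRangesOpen s i (true :: xs) = inferRangesOpen s (i + 1) xs := by
  rw [inferRangesOpen, inferRangesOpen]
  simp only [List.takeWhile, beq_self_eq_true, List.drop_succ_cons, List.length_cons]
  simp
  constructor
  · ring_nf
  · ring_nf

lemma open_false (s i : Int) (xs : List Bool) :
    inferRangesOpen s i (false :: xs) = (s, i - 1) :: inferRangesGo xs (i + 1) := by
  rw [inferRangesOpen]
  simp only [List.takeWhile]
  simp [go_false]

lemma main_loop (xs : List Bool) :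
    ∀ (i : Int) (acc : List (Int × Int)) (st : Option Int),
    inferRangesFin ((PySem.List.enumerate xs i).foldl inferRangesStepA (acc, st))
        (i + (xs.length : Int) - 1)
      = acc ++ (match st with
                | none => inferRangesGo xs i
                | some s => inferRangesOpen s i xs) := by
  induction xs with
  | nil =>
    intro i acc st
    cases st with
    | none => simp [PySem.List.enumerate, inferRangesFin, inferRangesGo]
    | some s => simp [PySem.List.enumerate, inferRangesFin, inferRangesOpen, inferRangesGo]
  | cons b xs ih =>
    intro i acc st
    rw [PySem.List.enumerate_cons, List.foldl_cons]
    cases st with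
    | none =>
      cases b with
      | false =>
        have h := ih (i + 1) acc none
        simp only [inferRangesStepA]
        simp only [List.length_cons]
        have he : i + ((xs.length : Int) + 1) - 1 = (i + 1) + (xs.length : Int) - 1 := by ring
        rw [show ((xs.length + 1 : Nat) : Int) = (xs.length : Int) + 1 by push_cast; ring, he, h,
          go_false]
      | true =>
        have h := ih (i + 1) acc (some i)
        simp only [inferRangesStepA]
        simp only [List.length_cons]
        have he : i + ((xs.length : Int) + 1) - 1 = (i + 1) + (xs.length : Int) - 1 := by ring
        rw [show ((xs.length + 1 : Nat) : Int) = (xs.length : Int) + 1 by push_cast; ring, he, h,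
          go_true]
    | some s =>
      cases b with
      | false =>
        have h := ih (i + 1) (acc ++ [(s, i - 1)]) none
        simp only [inferRangesStepA]
        simp only [List.length_cons]
        have he : i + ((xs.length : Int) + 1) - 1 = (i + 1) + (xs.length : Int) - 1 := by ring
        rw [show ((xs.length + 1 : Nat) : Int) = (xs.length : Int) + 1 by push_cast; ring, he, h,
          open_false]
        simp
      | true =>
        have h := ih (i + 1) acc (some s)
        simp only [inferRangesStepA]
        simp only [List.length_cons]
        have he : i + ((xs.length : Int) + 1) - 1 = (i + 1) + (xs.length : Int) - 1 := by ring
        rw [show ((xs.length + 1 : Nat) : Int) = (xs.length : Int) + 1 by push_cast; ring, he, h,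
          open_true]

-- ===== VERDICT (by name: the statement is the Claim_ definition above) =====
theorem inferRanges_py_spec : Claim_equal_inferRanges_py := by
  intro sequence _
  show inferRanges_py sequence = inferRanges_py_alt sequence
  have h := main_loop sequence 0 [] none
  simp only [inferRangesFin, zero_add, List.nil_append] at h
  simp only [inferRanges_py, inferRanges_py_alt]
  exact h
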